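-- pv_equiv track=rewrite | github.com/alonana/top | python/2020/swap_the_string.py | find_number_of_swaps
-- ===== SOURCE A (Python) =====
-- def generate(p, a0, n, x, y):
--     a = [a0]
--     for i in range(1, n):
--         curr = a[i - 1] * x + y
--         a.append(curr % 1812447359)
--
--     s = p
--     for i in range(len(p), n):
--         c = a[i] % 26 + ord('a')
--         s = s[:i] + chr(c) + s[i + 1:]
--
--     return s
--
-- def replace_count(s):
--     moves = 0
--     ord_a = ord('a')
--     letters = [0] * 26
--     for i in range(0, len(s)):
--         curr_ord = ord(s[i]) - ord_a
--         moves += sum(letters[:curr_ord])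
--         letters[curr_ord] += 1
--     return moves
--
-- def find_number_of_swaps(p, a0, x, y, n, k):
--     s = generate(p, a0, n, x, y)
--
--     score = 0
--     for i in range(k):
--         part = ""
--         while i < len(s):
--             part += s[i]
--             i += k
--         score += replace_count(part)
--     return score
-- ===== SOURCE B (Python) =====
-- def find_number_of_swaps(p, a0, x, y, n, k):
--     if k <= 0:
--         return 0
--     L = max(len(p), n)
--     counts = {}
--     score = 0
--     cur = a0
--     for i in range(L):
--         if i < len(p):
--             v = (ord(p[i]) - 97) % 26
--         else:
--             v = cur % 26
--         r = i % k
--         for u in range(v):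
--             score += counts.get((r, u), 0)
--         counts[(r, v)] = counts.get((r, v), 0) + 1
--         cur = (cur * x + y) % 1812447359
--     return score
-- ===== Notes on version B (the rewrite author's own statement) =====
-- stated objective: alternative
-- what changed: B replaces A's three-phase pipeline (build the string by repeated slice-and-concat surgery, then for each of the k residues extract a strided column and run a separate histogram pass over it) with one fused linear pass over the indices 0..max(len(p),n)-1 that derives each letter value directly from p or from the running recurrence value and maintains per-(residue,letter) counters in a single dictionary, so neither the string nor the columns are ever materialized.
import Mathlib
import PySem

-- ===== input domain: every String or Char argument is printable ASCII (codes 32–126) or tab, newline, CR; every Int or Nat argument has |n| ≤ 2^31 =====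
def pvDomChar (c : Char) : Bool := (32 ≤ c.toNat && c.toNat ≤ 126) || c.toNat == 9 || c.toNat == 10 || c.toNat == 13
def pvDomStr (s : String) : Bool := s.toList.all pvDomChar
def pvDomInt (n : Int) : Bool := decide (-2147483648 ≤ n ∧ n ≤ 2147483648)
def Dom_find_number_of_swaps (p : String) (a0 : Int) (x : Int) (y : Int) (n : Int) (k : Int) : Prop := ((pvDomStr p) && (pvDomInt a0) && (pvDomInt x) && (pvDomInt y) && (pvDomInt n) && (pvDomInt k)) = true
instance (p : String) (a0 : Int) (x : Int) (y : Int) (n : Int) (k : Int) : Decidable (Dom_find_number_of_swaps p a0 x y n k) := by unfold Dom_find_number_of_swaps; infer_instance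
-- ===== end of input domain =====

-- One honest line: B fuses A's string generation and per-column histogram passes into a single
-- index-order pass with per-(residue,letter) counters (objective: alternative decomposition).

-- ===== PORT A =====
-- A's inner while loop 'while i < len(s): part += s[i]; i += k'.  The '0 < k' conjunct in the
-- guard only makes the recursion terminate; every call site has 0 ≤ i < k with 0 < k.
def fnosPart (s : List Char) (k : Int) (i : Int) : List Char :=
  if h : 0 < k ∧ i < (s.length : Int) then
    PySem.List.pyGetD s i ' ' :: fnosPart s k (i + k)
  else []
termination_by ((s.length : Int) - i).toNat
decreasing_by obtain ⟨h1, h2⟩ := h; omega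

-- A's generate(p, a0, n, x, y): builds the list a, then rewrites s by slice surgery.
def fnosGenerate (p : List Char) (a0 : Int) (n : Int) (x : Int) (y : Int) : List Char :=
  let a := (PySem.List.pyRange 1 n 1).foldl
    (fun a i => a ++ [PySem.Int.mod (PySem.List.pyGetD a (i - 1) 0 * x + y) 1812447359]) [a0]
  (PySem.List.pyRange (p.length : Int) n 1).foldl
    (fun s i =>
      PySem.List.slice s none (some i)
        ++ [Char.ofNat (PySem.Int.mod (PySem.List.pyGetD a i 0) 26 + 97).toNat]
        ++ PySem.List.slice s (some (i + 1)) none)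
    p

-- one iteration of A's replace_count loop body (curr_ord = ord(s[i]) - ord('a'))
def fnosRCStep (st : Int × List Int) (c : Char) : Int × List Int :=
  (st.1 + (PySem.List.slice st.2 none (some ((c.toNat : Int) - 97))).sum,
   PySem.List.pySetD st.2 ((c.toNat : Int) - 97)
     (PySem.List.pyGetD st.2 ((c.toNat : Int) - 97) 0 + 1))

def fnosReplaceCount (s : List Char) : Int :=
  ((PySem.List.pyRange 0 (s.length : Int) 1).foldl
    (fun st i => fnosRCStep st (PySem.List.pyGetD s i ' '))
    ((0 : Int), List.replicate 26 (0 : Int))).1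

def find_number_of_swaps (p : String) (a0 : Int) (x : Int) (y : Int) (n : Int) (k : Int) : Int :=
  (PySem.List.pyRange 0 k 1).foldl
    (fun score i => score + fnosReplaceCount (fnosPart (fnosGenerate p.toList a0 n x y) k i)) 0

-- ===== PORT B =====
-- one iteration of B's fused loop; state = (counts, score, cur)
def fnosAltStep (k : Int) (pl : List Char) (x : Int) (y : Int)
    (st : PySem.Dict (Int × Int) Int × Int × Int) (i : Int) :
    PySem.Dict (Int × Int) Int × Int × Int :=
  let v : Int :=
    if i < (pl.length : Int)
      then PySem.Int.mod (((PySem.List.pyGetD pl i ' ').toNat : Int) - 97) 26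
      else PySem.Int.mod st.2.2 26
  let r := PySem.Int.mod i k
  let score := (PySem.List.pyRange 0 v 1).foldl (fun sc u => sc + st.1.getD (r, u) 0) st.2.1
  (st.1.insert (r, v) (st.1.getD (r, v) 0 + 1), score, PySem.Int.mod (st.2.2 * x + y) 1812447359)

def find_number_of_swaps_alt (p : String) (a0 : Int) (x : Int) (y : Int) (n : Int) (k : Int) : Int :=
  if k ≤ 0 then 0
  else
    ((PySem.List.pyRange 0 (max (p.toList.length : Int) n) 1).foldl
      (fnosAltStep k p.toList x y) (PySem.Dict.empty, (0 : Int), a0)).2.1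

-- ===== PRECONDITION & SPEC =====
-- Pre_ excludes exactly the inputs on which A raises IndexError: when k ≥ 1 every character of p
-- must have code in [71, 122] ('G'..'z'), otherwise replace_count indexes letters out of range.
def Pre_find_number_of_swaps (p : String) (a0 : Int) (x : Int) (y : Int) (n : Int) (k : Int) : Prop :=
  k ≤ 0 ∨ p.toList.all (fun c => 71 ≤ c.toNat && c.toNat ≤ 122) = true
instance (p : String) (a0 : Int) (x : Int) (y : Int) (n : Int) (k : Int) : Decidable (Pre_find_number_of_swaps p a0 x y n k) := by unfold Pre_find_number_of_swaps; infer_instance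

def pvWitness_find_number_of_swaps : String × Int × Int × Int × Int × Int := ("ba", 5, 3, 7, 4, 2)

def Spec_find_number_of_swaps (p : String) (a0 : Int) (x : Int) (y : Int) (n : Int) (k : Int) (out : Int) : Prop := out = find_number_of_swaps_alt p a0 x y n k
instance (p : String) (a0 : Int) (x : Int) (y : Int) (n : Int) (k : Int) (out : Int) : Decidable (Spec_find_number_of_swaps p a0 x y n k out) := by unfold Spec_find_number_of_swaps; infer_instance

-- ===== CLAIM (what is proved, stated in full; the proofs are below) =====
def Claim_equal_find_number_of_swaps : Prop := ∀ (p : String) (a0 : Int) (x : Int) (y : Int) (n : Int) (k : Int), Dom_find_number_of_swaps p a0 x y n k → Pre_find_number_of_swaps p a0 x y n k → Spec_find_number_of_swaps p a0 x y n k (find_number_of_swaps p a0 x y n k)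
-- ===== LEMMAS AND PROOFS =====

-- the recurrence a[i] (a[0] = a0 unreduced, as in A)
def pvAseq (a0 x y : Int) : Nat → Int
  | 0 => a0
  | i + 1 => PySem.Int.mod (pvAseq a0 x y i * x + y) 1812447359

-- normalized letter value of a character
def pvVal (c : Char) : Int := PySem.Int.mod ((c.toNat : Int) - 97) 26

-- the sequence of letter values of the full (generated) string
def pvV (pl : List Char) (a0 x y n : Int) : List Int :=
  pl.map pvVal ++
    (PySem.List.pyRange (pl.length : Int) n 1).map (fun i => PySem.Int.mod (pvAseq a0 x y i.toNat) 26)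

-- every k-th element, starting at the head
def pvStrided {α : Type} : List α → Nat → List α
  | [], _ => []
  | c :: t, k => c :: pvStrided (t.drop (k - 1)) k
termination_by l _ => l.length
decreasing_by simp <;> omega

-- number of pairs i < j with l[i] < l[j]
def pvPC : List Int → Int
  | [] => 0
  | c :: t => (t.countP (fun d => c < d) : Int) + pvPC t

-- the total score: sum over residues of the pair count of each strided column
def pvF (kN : Nat) (vs : List Int) : Int :=
  ((List.range kN).map (fun r => pvPC (pvStrided (vs.drop r) kN))).sum

-- letters histogram after processing a value list
def pvHist (t : List Int) : List Int :=
  (List.range 26).map (fun (j : Nat) => ((t.countP (fun d => d = (j : Int))) : Int))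

theorem pv_mod26 (a : Int) : PySem.Int.mod a 26 = a % 26 :=
  PySem.Int.mod_eq_emod_of_pos (by norm_num)

theorem pvStrided_nil {α : Type} (kN : Nat) : pvStrided ([] : List α) kN = [] := by
  rw [pvStrided.eq_def]

theorem pvStrided_cons {α : Type} (c : α) (t : List α) (kN : Nat) :
    pvStrided (c :: t) kN = c :: pvStrided (t.drop (kN - 1)) kN := by
  rw [pvStrided.eq_def]

theorem pvHist_length (t : List Int) : (pvHist t).length = 26 := by simp [pvHist]

theorem pvHist_nil : pvHist [] = List.replicate 26 (0 : Int) := by decide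

theorem pvF_nil (kN : Nat) : pvF kN [] = 0 := by
  unfold pvF
  have hz : ∀ r ∈ List.range kN, pvPC (pvStrided (([] : List Int).drop r) kN) = 0 := by
    intro r _
    rw [List.drop_nil, pvStrided_nil]
    rfl
  rw [List.map_congr_left hz]
  simp

theorem pv_val_bounds (c : Char) : 0 ≤ pvVal c ∧ pvVal c < 26 :=
  ⟨PySem.Int.mod_nonneg _ (by norm_num), PySem.Int.mod_lt _ (by norm_num)⟩

theorem pv_sum_single (kN r0 : Nat) (c : Int) (h : r0 < kN) :
    ((List.range kN).map (fun r => if r = r0 then c else (0 : Int))).sum = c := by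
  induction kN with
  | zero => omega
  | succ m ih =>
    rw [List.range_succ, List.map_append, List.sum_append]
    by_cases hm : r0 < m
    · have hne : ¬ (m = r0) := by omega
      rw [ih hm]
      simp [hne]
    · have hr : r0 = m := by omega
      subst hr
      have hz : ∀ r ∈ List.range r0, (if r = r0 then c else (0 : Int)) = 0 := by
        intro r hr'
        rw [List.mem_range] at hr'
        simp [Nat.ne_of_lt hr']
      rw [List.map_congr_left hz]
      simp

theorem pv_ind_sum (c : Int) (j : Nat) :
    ((List.range j).map (fun (u : Nat) => if c = (u : Int) then (1 : Int) else 0)).sum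
      = if 0 ≤ c ∧ c < (j : Int) then 1 else 0 := by
  induction j with
  | zero =>
    have h : ¬ (0 ≤ c ∧ c < ((0 : Nat) : Int)) := by omega
    simp [h]
  | succ m ih =>
    rw [List.range_succ, List.map_append, List.sum_append, ih]
    simp only [List.map_cons, List.map_nil, List.sum_cons, List.sum_nil, add_zero]
    split_ifs <;> push_cast at * <;> omega

theorem pv_count_sum (l : List Int) (hl : ∀ d ∈ l, 0 ≤ d) (j : Nat) :
    ((List.range j).map (fun (u : Nat) => ((l.countP (fun d => d = (u : Int))) : Int))).sum
      = ((l.countP (fun d => d < (j : Int))) : Int) := by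
  induction l with
  | nil => simp
  | cons c t ih =>
    have hc : 0 ≤ c := hl c List.mem_cons_self
    have ht : ∀ d ∈ t, 0 ≤ d := fun d hd => hl d (List.mem_cons_of_mem _ hd)
    simp only [List.countP_cons]
    have h1 : ((List.range j).map (fun (u : Nat) =>
          (((t.countP (fun d => d = (u : Int)) + if (decide (c = (u : Int))) = true then 1 else 0 : Nat)) : Int))).sum
        = ((List.range j).map (fun (u : Nat) =>
          ((t.countP (fun d => d = (u : Int))) : Int) + (if c = (u : Int) then (1 : Int) else 0))).sum := by
      apply congrArg
      apply List.map_congr_left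
      intro u _
      simp only [Nat.cast_add, Nat.cast_ite, Nat.cast_one, Nat.cast_zero, decide_eq_true_eq]
    rw [h1, PySem.List.sum_map_add_int, ih ht, pv_ind_sum]
    have h2 : (0 ≤ c ∧ c < (j : Int)) ↔ (c < (j : Int)) := ⟨fun h => h.2, fun h => ⟨hc, h⟩⟩
    rw [if_congr h2 rfl rfl]
    simp only [Nat.cast_add, Nat.cast_ite, Nat.cast_one, Nat.cast_zero, decide_eq_true_eq]

theorem pvStrided_map_aux {α β : Type} (g : α → β) :
    ∀ (m : Nat) (l : List α) (kN : Nat), l.length ≤ m →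
      (pvStrided l kN).map g = pvStrided (l.map g) kN := by
  intro m
  induction m with
  | zero =>
    intro l kN h
    have hnil : l = [] := List.length_eq_zero_iff.mp (by omega)
    subst hnil
    simp [pvStrided_nil]
  | succ m ih =>
    intro l kN h
    match l with
    | [] => simp [pvStrided_nil]
    | c :: t =>
      rw [pvStrided_cons, List.map_cons, List.map_cons, pvStrided_cons, ← List.map_drop,
          ih (t.drop (kN - 1)) kN (by simp at h ⊢; omega)]

theorem pvStrided_map {α β : Type} (g : α → β) (l : List α) (kN : Nat) :
    (pvStrided l kN).map g = pvStrided (l.map g) kN :=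
  pvStrided_map_aux g l.length l kN le_rfl

theorem pvStrided_subset_aux {α : Type} (d : α) :
    ∀ (m : Nat) (l : List α) (kN : Nat), l.length ≤ m →
      d ∈ pvStrided l kN → d ∈ l := by
  intro m
  induction m with
  | zero =>
    intro l kN h hmem
    have hnil : l = [] := List.length_eq_zero_iff.mp (by omega)
    subst hnil
    rw [pvStrided_nil] at hmem
    exact absurd hmem (List.not_mem_nil)
  | succ m ih =>
    intro l kN h hmem
    match l with
    | [] =>
      rw [pvStrided_nil] at hmem
      exact absurd hmem (List.not_mem_nil)
    | c :: t =>
      rw [pvStrided_cons] at hmem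
      rcases List.mem_cons.mp hmem with hmem | hmem
      · simp [hmem]
      · exact List.mem_cons_of_mem _
          (List.mem_of_mem_drop (ih (t.drop (kN - 1)) kN (by simp at h ⊢; omega) hmem))

theorem pvStrided_subset {α : Type} (l : List α) (kN : Nat) (d : α)
    (h : d ∈ pvStrided l kN) : d ∈ l :=
  pvStrided_subset_aux d l.length l kN le_rfl h

theorem pv_mod_sub_iff (kN r a : Nat) (hk : 0 < kN) (hr : r < kN) (hle : r ≤ a) :
    (a - r) % kN = 0 ↔ a % kN = r := by
  constructor
  · intro h
    obtain ⟨q, hq⟩ := Nat.dvd_of_mod_eq_zero h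
    have ha : a = r + kN * q := by omega
    rw [ha, Nat.add_mul_mod_self_left]
    exact Nat.mod_eq_of_lt hr
  · intro h
    have hd := Nat.div_add_mod a kN
    have h2 : a - r = kN * (a / kN) := by omega
    rw [h2]
    exact Nat.mul_mod_right kN _

theorem pvStrided_append {α : Type} (kN : Nat) (hk : 0 < kN) :
    ∀ (m : Nat) (u : List α) (v : α), u.length ≤ m →
      pvStrided (u ++ [v]) kN
        = if u.length % kN = 0 then pvStrided u kN ++ [v] else pvStrided u kN := by
  intro m
  induction m with
  | zero =>
    intro u v hu
    have hnil : u = [] := List.length_eq_zero_iff.mp (by omega)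
    subst hnil
    rw [List.nil_append]
    simp [pvStrided_cons, pvStrided_nil]
  | succ m ih =>
    intro u v hu
    match u with
    | [] =>
      rw [List.nil_append]
      simp [pvStrided_cons, pvStrided_nil]
    | c :: t =>
      rw [List.cons_append, pvStrided_cons, pvStrided_cons]
      by_cases h1 : kN - 1 ≤ t.length
      · rw [List.drop_append_of_le_length h1,
            ih (t.drop (kN - 1)) v (by simp at hu ⊢; omega)]
        have hcong : (t.drop (kN - 1)).length % kN = 0 ↔ (c :: t).length % kN = 0 := by
          rw [List.length_drop, List.length_cons]
          rw [Nat.mod_eq_sub_mod (a := t.length + 1) (b := kN) (by omega)]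
          have harg : t.length + 1 - kN = t.length - (kN - 1) := by omega
          rw [harg]
        by_cases h2 : (c :: t).length % kN = 0
        · rw [if_pos (hcong.mpr h2), if_pos h2, List.cons_append]
        · rw [if_neg (fun hh => h2 (hcong.mp hh)), if_neg h2]
      · have hd1 : (t ++ [v]).drop (kN - 1) = ([] : List α) :=
          List.drop_eq_nil_of_le (by simp; omega)
        have hd2 : t.drop (kN - 1) = ([] : List α) := List.drop_eq_nil_of_le (by omega)
        rw [hd1, hd2]
        have h2 : ¬ ((c :: t).length % kN = 0) := by
          rw [List.length_cons, Nat.mod_eq_of_lt (by omega)]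
          omega
        rw [if_neg h2]

theorem pvPC_append (t : List Int) (v : Int) :
    pvPC (t ++ [v]) = pvPC t + ((t.countP (fun d => d < v)) : Int) := by
  induction t with
  | nil => simp [pvPC]
  | cons c t ih =>
    rw [List.cons_append, pvPC, pvPC, ih]
    simp only [List.countP_append, List.countP_cons, List.countP_nil, Nat.cast_add,
      Nat.cast_ite, Nat.cast_one, Nat.cast_zero, zero_add]
    ring

theorem pvF_append (kN : Nat) (hk : 0 < kN) (u : List Int) (v : Int) :
    pvF kN (u ++ [v])
      = pvF kN u + (((pvStrided (u.drop (u.length % kN)) kN).countP (fun d => d < v)) : Int) := by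
  unfold pvF
  have hr0lt : u.length % kN < kN := Nat.mod_lt _ hk
  have hr0le : u.length % kN ≤ u.length := Nat.mod_le _ _
  have hper : ∀ r ∈ List.range kN,
      pvPC (pvStrided ((u ++ [v]).drop r) kN)
        = pvPC (pvStrided (u.drop r) kN)
          + (if r = u.length % kN
              then (((pvStrided (u.drop (u.length % kN)) kN).countP (fun d => d < v)) : Int) else 0) := by
    intro r hrmem
    rw [List.mem_range] at hrmem
    by_cases hru : r ≤ u.length
    · rw [List.drop_append_of_le_length hru,
          pvStrided_append kN hk (u.drop r).length (u.drop r) v le_rfl]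
      have hiff : (u.drop r).length % kN = 0 ↔ r = u.length % kN := by
        rw [List.length_drop, pv_mod_sub_iff kN r u.length hk hrmem hru]
        constructor <;> intro h <;> omega
      by_cases hc : r = u.length % kN
      · rw [if_pos (hiff.mpr hc), if_pos hc, pvPC_append, hc]
      · rw [if_neg (fun hh => hc (hiff.mp hh)), if_neg hc, add_zero]
    · have h1 : (u ++ [v]).drop r = ([] : List Int) := List.drop_eq_nil_of_le (by simp; omega)
      have h2 : u.drop r = ([] : List Int) := List.drop_eq_nil_of_le (by omega)
      have h3 : ¬ (r = u.length % kN) := by omega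
      rw [h1, h2, if_neg h3, add_zero]
  rw [List.map_congr_left hper, PySem.List.sum_map_add_int, pv_sum_single kN _ _ hr0lt]

-- ---------- A-side lemmas ----------

theorem pv_aList (a0 x y : Int) (n : Int) :
    (PySem.List.pyRange 1 n 1).foldl
        (fun a i => a ++ [PySem.Int.mod (PySem.List.pyGetD a (i - 1) 0 * x + y) 1812447359]) [a0]
      = (List.range (max n 1).toNat).map (pvAseq a0 x y) := by
  by_cases hn : n ≤ 1
  · rw [PySem.List.pyRange_one_eq_nil hn]
    have h1 : (max n 1).toNat = 1 := by omega
    rw [h1]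
    simp [List.range_succ, pvAseq]
  · push_neg at hn
    have hmax : (max n 1).toNat = n.toNat := by omega
    rw [hmax]
    have key : ∀ (m : Nat),
        (PySem.List.pyRange 1 (1 + (m : Int)) 1).foldl
            (fun a i => a ++ [PySem.Int.mod (PySem.List.pyGetD a (i - 1) 0 * x + y) 1812447359]) [a0]
          = (List.range (1 + m)).map (pvAseq a0 x y) := by
      intro m
      induction m with
      | zero => simp [PySem.List.pyRange_one_eq_nil, List.range_succ, pvAseq]
      | succ m ih =>
        have hsplit : (1 + ((m + 1 : Nat) : Int)) = (1 + (m : Int)) + 1 := by push_cast; ring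
        rw [hsplit, PySem.List.pyRange_one_succ_right (by omega), List.foldl_append, ih]
        simp only [List.foldl_cons, List.foldl_nil]
        have hidx : (1 + (m : Int)) - 1 = ((m : Nat) : Int) := by push_cast; ring
        rw [hidx, PySem.List.pyGetD_natCast]
        rw [List.getD_eq_getElem _ _ (by simp only [List.length_map, List.length_range]; omega)]
        have hget : ((List.range (1 + m)).map (pvAseq a0 x y))[m]'(by
            simp only [List.length_map, List.length_range]; omega) = pvAseq a0 x y m := by
          simp
        rw [hget]
        have hr : (1 + (m + 1)) = (1 + m) + 1 := by omega
        rw [hr, List.range_succ, List.map_append]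
        congr 1
        have ha : pvAseq a0 x y (1 + m) = PySem.Int.mod (pvAseq a0 x y m * x + y) 1812447359 := by
          have hb : 1 + m = m + 1 := by omega
          rw [hb, pvAseq]
        simp [ha]
    have hn' : n = 1 + (((n - 1).toNat : Nat) : Int) := by omega
    conv_lhs => rw [hn']
    rw [key]
    have he : 1 + (n - 1).toNat = n.toNat := by omega
    rw [he]

theorem pv_gen_fold (g : Int → Char) :
    ∀ (j : Nat) (s : List Char),
      (PySem.List.pyRange (s.length : Int) ((s.length : Int) + (j : Int)) 1).foldl
          (fun s i =>
            PySem.List.slice s none (some i) ++ [g i] ++ PySem.List.slice s (some (i + 1)) none) s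
        = s ++ (PySem.List.pyRange (s.length : Int) ((s.length : Int) + (j : Int)) 1).map g := by
  intro j
  induction j with
  | zero =>
    intro s
    rw [show ((s.length : Int) + ((0 : Nat) : Int)) = (s.length : Int) by push_cast; ring]
    rw [PySem.List.pyRange_one_eq_nil le_rfl]
    simp
  | succ j ih =>
    intro s
    have hsplit : ((s.length : Int) + ((j + 1 : Nat) : Int)) = ((s.length : Int) + (j : Int)) + 1 := by
      push_cast; ring
    rw [hsplit, PySem.List.pyRange_one_succ_right (by omega), List.foldl_append, ih]
    simp only [List.foldl_cons, List.foldl_nil]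
    have hlenprev :
        (s ++ (PySem.List.pyRange (s.length : Int) ((s.length : Int) + (j : Int)) 1).map g).length
          = s.length + j := by
      simp [PySem.List.length_pyRange_one]
    have h1 : PySem.List.slice
        (s ++ (PySem.List.pyRange (s.length : Int) ((s.length : Int) + (j : Int)) 1).map g)
        none (some ((s.length : Int) + (j : Int)))
        = s ++ (PySem.List.pyRange (s.length : Int) ((s.length : Int) + (j : Int)) 1).map g := by
      rw [PySem.List.slice_to _ (by omega)]
      apply List.take_of_length_le
      rw [hlenprev]
      omega
    have h2 : PySem.List.slice
        (s ++ (PySem.List.pyRange (s.length : Int) ((s.length : Int) + (j : Int)) 1).map g)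
        (some (((s.length : Int) + (j : Int)) + 1)) none = [] := by
      rw [PySem.List.slice_from _ (by omega)]
      apply List.drop_eq_nil_of_le
      rw [hlenprev]
      omega
    rw [h1, h2, List.map_append]
    simp

-- the generated suffix of the string
def pvGenList (pl : List Char) (a0 x y n : Int) : List Char :=
  (PySem.List.pyRange (pl.length : Int) n 1).map
    (fun i => Char.ofNat (PySem.Int.mod (pvAseq a0 x y i.toNat) 26 + 97).toNat)

theorem pv_generate (pl : List Char) (a0 x y n : Int) :
    fnosGenerate pl a0 n x y = pl ++ pvGenList pl a0 x y n := by
  unfold fnosGenerate pvGenList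
  simp only
  rw [pv_aList a0 x y n]
  by_cases hn : n ≤ (pl.length : Int)
  · rw [PySem.List.pyRange_one_eq_nil hn]
    simp
  · push_neg at hn
    have hgoal : ∀ (b : Int), b = n →
        (PySem.List.pyRange (pl.length : Int) b 1).foldl
            (fun s i =>
              PySem.List.slice s none (some i)
                ++ [Char.ofNat (PySem.Int.mod
                      (PySem.List.pyGetD ((List.range (max n 1).toNat).map (pvAseq a0 x y)) i 0) 26
                      + 97).toNat]
                ++ PySem.List.slice s (some (i + 1)) none) pl
          = pl ++ (PySem.List.pyRange (pl.length : Int) b 1).map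
              (fun i => Char.ofNat (PySem.Int.mod (pvAseq a0 x y i.toNat) 26 + 97).toNat) := by
      intro b hb
      have hsplit : b = (pl.length : Int) + (((n - pl.length).toNat : Nat) : Int) := by omega
      subst hsplit
      rw [pv_gen_fold
        (fun i => Char.ofNat ((PySem.Int.mod
          (PySem.List.pyGetD ((List.range (max n 1).toNat).map (pvAseq a0 x y)) i 0) 26 + 97).toNat))]
      congr 1
      apply List.map_congr_left
      intro i hi
      rw [PySem.List.mem_pyRange_one] at hi
      have hival : PySem.List.pyGetD ((List.range (max n 1).toNat).map (pvAseq a0 x y)) i 0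
          = pvAseq a0 x y i.toNat := by
        rw [PySem.List.pyGetD_eq_getElem _ _ (by omega)
          (by simp only [List.length_map, List.length_range]; omega)]
        simp
      rw [hival]
    exact hgoal n rfl

theorem pv_gen_chars (pl : List Char) (a0 x y n : Int) :
    ∀ c ∈ pvGenList pl a0 x y n, 97 ≤ c.toNat ∧ c.toNat ≤ 122 := by
  intro c hc
  unfold pvGenList at hc
  rw [List.mem_map] at hc
  obtain ⟨i, _, hival⟩ := hc
  have h0 : 0 ≤ PySem.Int.mod (pvAseq a0 x y i.toNat) 26 := PySem.Int.mod_nonneg _ (by norm_num)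
  have h1 : PySem.Int.mod (pvAseq a0 x y i.toNat) 26 < 26 := PySem.Int.mod_lt _ (by norm_num)
  subst hival
  rw [Char.toNat_ofNat]
  have hvalid : (PySem.Int.mod (pvAseq a0 x y i.toNat) 26 + 97).toNat.isValidChar := by
    unfold Nat.isValidChar
    left
    omega
  rw [if_pos hvalid]
  omega

theorem pv_val_gen (pl : List Char) (a0 x y n : Int) :
    (pvGenList pl a0 x y n).map pvVal
      = (PySem.List.pyRange (pl.length : Int) n 1).map
          (fun i => PySem.Int.mod (pvAseq a0 x y i.toNat) 26) := by
  unfold pvGenList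
  rw [List.map_map]
  apply List.map_congr_left
  intro i _
  simp only [Function.comp]
  have h0 : 0 ≤ PySem.Int.mod (pvAseq a0 x y i.toNat) 26 := PySem.Int.mod_nonneg _ (by norm_num)
  have h1 : PySem.Int.mod (pvAseq a0 x y i.toNat) 26 < 26 := PySem.Int.mod_lt _ (by norm_num)
  have hvalid : (PySem.Int.mod (pvAseq a0 x y i.toNat) 26 + 97).toNat.isValidChar := by
    unfold Nat.isValidChar; left; omega
  unfold pvVal
  rw [Char.toNat_ofNat, if_pos hvalid]
  have harg : (((PySem.Int.mod (pvAseq a0 x y i.toNat) 26 + 97).toNat : Int) - 97)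
      = PySem.Int.mod (pvAseq a0 x y i.toNat) 26 := by omega
  rw [harg]
  rw [PySem.Int.mod_eq_emod_of_pos (by norm_num)]
  exact Int.emod_eq_of_lt h0 h1

theorem pv_V_eq (pl : List Char) (a0 x y n : Int) :
    pvV pl a0 x y n = (pl ++ pvGenList pl a0 x y n).map pvVal := by
  unfold pvV
  rw [List.map_append, pv_val_gen]

theorem pv_V_bounds (pl : List Char) (a0 x y n : Int) :
    ∀ d ∈ pvV pl a0 x y n, 0 ≤ d ∧ d < 26 := by
  intro d hd
  unfold pvV at hd
  rw [List.mem_append] at hd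
  rcases hd with hd | hd <;> rw [List.mem_map] at hd <;> obtain ⟨c, _, hc⟩ := hd <;> subst hc
  · exact pv_val_bounds c
  · exact ⟨PySem.Int.mod_nonneg _ (by norm_num), PySem.Int.mod_lt _ (by norm_num)⟩

theorem pv_V_len (pl : List Char) (a0 x y n : Int) :
    (pvV pl a0 x y n).length = (max (pl.length : Int) n).toNat := by
  unfold pvV
  rw [List.length_append, List.length_map, List.length_map, PySem.List.length_pyRange_one]
  omega

theorem pv_part (s : List Char) (k i : Int) (hk : 0 < k) (hi : 0 ≤ i) :
    fnosPart s k i = pvStrided (s.drop i.toNat) k.toNat := by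
  have key : ∀ (m : Nat) (i : Int), 0 ≤ i → s.length - i.toNat ≤ m →
      fnosPart s k i = pvStrided (s.drop i.toNat) k.toNat := by
    intro m
    induction m with
    | zero =>
      intro i hi0 hm
      rw [fnosPart]
      have hnil : s.drop i.toNat = [] := List.drop_eq_nil_of_le (by omega)
      rw [dif_neg (by omega), hnil, pvStrided_nil]
    | succ m ih =>
      intro i hi0 hm
      rw [fnosPart]
      by_cases hlt : i < (s.length : Int)
      · rw [dif_pos ⟨hk, hlt⟩]
        have hidx : i.toNat < s.length := by omega
        rw [PySem.List.pyGetD_eq_getElem _ _ hi0 (by omega)]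
        rw [List.drop_eq_getElem_cons hidx, pvStrided_cons]
        congr 1
        rw [List.drop_drop]
        have harg : i.toNat + 1 + (k.toNat - 1) = (i + k).toNat := by omega
        rw [harg]
        exact ih (i + k) (by omega) (by omega)
      · rw [dif_neg (by intro hh; exact hlt hh.2)]
        have hnil : s.drop i.toNat = [] := List.drop_eq_nil_of_le (by omega)
        rw [hnil, pvStrided_nil]
  exact key (s.length - i.toNat) i hi le_rfl

theorem pv_hist_getElem (t : List Int) (j : Nat) (hj : j < (pvHist t).length) :
    (pvHist t)[j] = ((t.countP (fun d => d = (j : Int))) : Int) := by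
  simp [pvHist]

theorem pv_slice_hist (t : List Int) (co : Int) (h1 : -26 ≤ co) (h2 : co < 26) :
    PySem.List.slice (pvHist t) none (some co) = (pvHist t).take (PySem.Int.mod co 26).toNat := by
  rw [pv_mod26]
  by_cases h : 0 ≤ co
  · rw [PySem.List.slice_to _ h]
    congr 1
    omega
  · push_neg at h
    have hkk : co = -(((-co).toNat : Nat) : Int) := by omega
    rw [hkk, PySem.List.slice_to_neg_natCast _ _ (by omega), pvHist_length]
    congr 1
    omega

theorem pv_getD_hist (t : List Int) (co : Int) (h1 : -26 ≤ co) (h2 : co < 26) :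
    PySem.List.pyGetD (pvHist t) co 0
      = ((t.countP (fun d => d = PySem.Int.mod co 26)) : Int) := by
  simp only [pv_mod26]
  by_cases h : 0 ≤ co
  · rw [PySem.List.pyGetD_eq_getElem _ _ h (by rw [pvHist_length]; omega)]
    rw [pv_hist_getElem _ _ (by rw [pvHist_length]; omega)]
    have he : ((co.toNat : Nat) : Int) = co % 26 := by omega
    simp only [he]
  · push_neg at h
    have hkk : co = -(((-co).toNat : Nat) : Int) := by omega
    rw [hkk, PySem.List.pyGetD_neg_natCast _ _ _ (by omega) (by rw [pvHist_length]; omega)]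
    rw [pv_hist_getElem _ _ (by
      rw [pvHist_length] at *
      omega)]
    have he : ((((pvHist t).length - (-co).toNat : Nat)) : Int) = -(((-co).toNat : Nat) : Int) % 26 := by
      have hlen := pvHist_length t
      omega
    simp only [he]

theorem pv_pySetD_neg {α : Type} (xs : List α) (kk : Nat) (hk : 0 < kk) (hl : kk ≤ xs.length)
    (w : α) : PySem.List.pySetD xs (-(kk : Int)) w = xs.set (xs.length - kk) w := by
  unfold PySem.List.pySetD PySem.List.pySet? PySem.List.pyIdx?
  have h1 : ¬ (0 ≤ -((kk : Nat) : Int)) := by omega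
  have h2 : -((xs.length : Nat) : Int) ≤ -((kk : Nat) : Int) := by omega
  rw [if_neg h1, if_pos h2]
  simp

theorem pv_set_hist (t : List Int) (co : Int) (h1 : -26 ≤ co) (h2 : co < 26) :
    PySem.List.pySetD (pvHist t) co (PySem.List.pyGetD (pvHist t) co 0 + 1)
      = pvHist (t ++ [PySem.Int.mod co 26]) := by
  have hv0 : 0 ≤ PySem.Int.mod co 26 := PySem.Int.mod_nonneg _ (by norm_num)
  have hv26 : PySem.Int.mod co 26 < 26 := PySem.Int.mod_lt _ (by norm_num)
  have hm := pv_mod26 co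
  rw [pv_getD_hist t co h1 h2]
  have hset : PySem.List.pySetD (pvHist t) co
        (((t.countP (fun d => d = PySem.Int.mod co 26)) : Int) + 1)
      = (pvHist t).set (PySem.Int.mod co 26).toNat
        (((t.countP (fun d => d = PySem.Int.mod co 26)) : Int) + 1) := by
    by_cases h : 0 ≤ co
    · rw [PySem.List.pySetD_of_nonneg _ _ h]
      congr 1
      omega
    · push_neg at h
      have hkk : co = -(((-co).toNat : Nat) : Int) := by omega
      rw [hkk, pv_pySetD_neg _ _ (by omega) (by rw [pvHist_length]; omega)]
      congr 1
      have hlen := pvHist_length t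
      rw [hkk] at hm
      omega
  rw [hset]
  apply List.ext_getElem
  · rw [List.length_set, pvHist_length, pvHist_length]
  intro i hi1 hi2
  rw [List.getElem_set, pv_hist_getElem _ _ hi2, List.countP_append, List.countP_singleton]
  have hi26 : i < 26 := by rw [pvHist_length] at hi2; omega
  by_cases hiv : (PySem.Int.mod co 26).toNat = i
  · rw [if_pos hiv]
    have hvi : PySem.Int.mod co 26 = (i : Int) := by omega
    have hb : (decide (PySem.Int.mod co 26 = (i : Int))) = true := by
      simp only [decide_eq_true_eq]
      exact hvi
    rw [hb]
    simp only [hvi]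
    push_cast
    omega
  · rw [if_neg hiv]
    have hvi : ¬ (PySem.Int.mod co 26 = (i : Int)) := by omega
    have hb : (decide (PySem.Int.mod co 26 = (i : Int))) = false := by
      simp only [decide_eq_false_iff_not]
      exact hvi
    rw [hb]
    rw [pv_hist_getElem _ _ (by rw [List.length_set] at hi1; exact hi1)]
    simp

theorem pv_take_hist_sum (t : List Int) (ht : ∀ d ∈ t, 0 ≤ d) (j : Nat) (hj : j ≤ 26) :
    ((pvHist t).take j).sum = ((t.countP (fun d => d < (j : Int))) : Int) := by
  unfold pvHist
  rw [← List.map_take, List.take_range, Nat.min_eq_left hj]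
  exact pv_count_sum t ht j

theorem pv_rc_step (done : List Int) (hdone : ∀ d ∈ done, 0 ≤ d) (c : Char)
    (hc : 71 ≤ c.toNat ∧ c.toNat ≤ 122) :
    fnosRCStep (pvPC done, pvHist done) c
      = (pvPC (done ++ [pvVal c]), pvHist (done ++ [pvVal c])) := by
  have hco1 : -26 ≤ (c.toNat : Int) - 97 := by omega
  have hco2 : (c.toNat : Int) - 97 < 26 := by omega
  have hm := pv_mod26 ((c.toNat : Int) - 97)
  have hvdef : pvVal c = PySem.Int.mod ((c.toNat : Int) - 97) 26 := rfl
  unfold fnosRCStep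
  simp only [Prod.mk.injEq]
  constructor
  · rw [pv_slice_hist done _ hco1 hco2,
        pv_take_hist_sum done hdone _ (by omega), pvPC_append, hvdef]
    have he : (((PySem.Int.mod ((c.toNat : Int) - 97) 26).toNat : Nat) : Int)
        = PySem.Int.mod ((c.toNat : Int) - 97) 26 := by omega
    simp only [he]
  · rw [hvdef]
    exact pv_set_hist done _ hco1 hco2

theorem pv_rc_loop (s : List Char) (hs : ∀ c ∈ s, 71 ≤ c.toNat ∧ c.toNat ≤ 122) :
    ∀ (done : List Int), (∀ d ∈ done, 0 ≤ d) →
      s.foldl fnosRCStep (pvPC done, pvHist done)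
        = (pvPC (done ++ s.map pvVal), pvHist (done ++ s.map pvVal)) := by
  induction s with
  | nil => intro done _; simp
  | cons c t ih =>
    intro done hdone
    have hc := hs c List.mem_cons_self
    have hts : ∀ c' ∈ t, 71 ≤ c'.toNat ∧ c'.toNat ≤ 122 :=
      fun c' hc' => hs c' (List.mem_cons_of_mem _ hc')
    rw [List.foldl_cons, pv_rc_step done hdone c hc]
    have hdone' : ∀ d ∈ done ++ [pvVal c], 0 ≤ d := by
      intro d hd
      rw [List.mem_append] at hd
      rcases hd with hd | hd
      · exact hdone d hd
      · rw [List.mem_singleton] at hd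
        rw [hd]
        exact (pv_val_bounds c).1
    rw [ih hts (done ++ [pvVal c]) hdone']
    simp

theorem pv_rc (s : List Char) (hs : ∀ c ∈ s, 71 ≤ c.toNat ∧ c.toNat ≤ 122) :
    fnosReplaceCount s = pvPC (s.map pvVal) := by
  unfold fnosReplaceCount
  rw [PySem.List.foldl_pyRange_zero_pyGetD' s ' ' fnosRCStep ((0 : Int), List.replicate 26 (0 : Int))]
  have hinit : ((0 : Int), List.replicate 26 (0 : Int)) = (pvPC [], pvHist []) := by
    rw [pvHist_nil]
    rfl
  rw [hinit, pv_rc_loop s hs [] (by simp)]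
  simp

theorem pv_A (p : String) (a0 x y n k : Int) (hk : 0 < k)
    (hch : ∀ c ∈ p.toList, 71 ≤ c.toNat ∧ c.toNat ≤ 122) :
    find_number_of_swaps p a0 x y n k = pvF k.toNat (pvV p.toList a0 x y n) := by
  unfold find_number_of_swaps
  have hsgen := pv_generate p.toList a0 x y n
  have hschars : ∀ c ∈ fnosGenerate p.toList a0 n x y, 71 ≤ c.toNat ∧ c.toNat ≤ 122 := by
    rw [hsgen]
    intro c hcmem
    rw [List.mem_append] at hcmem
    rcases hcmem with h | h
    · exact hch c h
    · have := pv_gen_chars p.toList a0 x y n c h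
      omega
  rw [PySem.List.foldl_add]
  rw [PySem.List.pyRange_zero k, List.map_map, zero_add]
  unfold pvF
  congr 1
  apply List.map_congr_left
  intro r hr
  rw [List.mem_range] at hr
  simp only [Function.comp]
  rw [pv_part _ k (r : Int) hk (by omega)]
  have htn : ((r : Int)).toNat = r := by omega
  rw [htn]
  have hparts : ∀ c' ∈ pvStrided ((fnosGenerate p.toList a0 n x y).drop r) k.toNat,
      71 ≤ c'.toNat ∧ c'.toNat ≤ 122 :=
    fun c' h => hschars c' (List.mem_of_mem_drop (pvStrided_subset _ _ _ h))
  rw [pv_rc _ hparts, pvStrided_map pvVal _ k.toNat, List.map_drop]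
  have hV : (fnosGenerate p.toList a0 n x y).map pvVal = pvV p.toList a0 x y n := by
    rw [hsgen, ← pv_V_eq]
  rw [hV]

-- ---------- B-side lemmas ----------

theorem pv_V_get (pl : List Char) (a0 x y n : Int) (m : Nat)
    (hm : m < (pvV pl a0 x y n).length) :
    (if (m : Int) < (pl.length : Int)
      then PySem.Int.mod (((PySem.List.pyGetD pl (m : Int) ' ').toNat : Int) - 97) 26
      else PySem.Int.mod (pvAseq a0 x y m) 26) = (pvV pl a0 x y n)[m] := by
  by_cases hc : m < pl.length
  · rw [if_pos (by exact_mod_cast hc)]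
    unfold pvV
    rw [List.getElem_append_left (by simp [hc])]
    rw [List.getElem_map]
    rw [PySem.List.pyGetD_natCast, List.getD_eq_getElem _ _ hc]
    rfl
  · rw [if_neg (by push_neg at hc ⊢; exact_mod_cast hc)]
    unfold pvV
    rw [List.getElem_append_right (by simp; omega)]
    rw [List.getElem_map, PySem.List.getElem_pyRange_one]
    have he : ((pl.length : Int) + ((m - (pl.map pvVal).length : Nat) : Int)).toNat = m := by
      simp only [List.length_map]
      omega
    rw [he]

theorem pv_getD_sum (counts : PySem.Dict (Int × Int) Int) (r v score : Int) (col : List Int)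
    (hcol : ∀ d ∈ col, 0 ≤ d) (hv0 : 0 ≤ v)
    (hc : ∀ u : Int, counts.getD (r, u) 0 = ((col.countP (fun d => d = u)) : Int)) :
    (PySem.List.pyRange 0 v 1).foldl (fun sc u => sc + counts.getD (r, u) 0) score
      = score + ((col.countP (fun d => d < v)) : Int) := by
  rw [PySem.List.foldl_add]
  congr 1
  rw [PySem.List.pyRange_zero v, List.map_map]
  have hcong : ∀ u ∈ List.range v.toNat,
      ((fun u => counts.getD (r, u) 0) ∘ (fun (q : Nat) => (q : Int))) u
        = ((col.countP (fun d => d = ((u : Nat) : Int))) : Int) := fun u _ => hc _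
  rw [List.map_congr_left hcong, pv_count_sum col hcol v.toNat]
  have he : ((v.toNat : Nat) : Int) = v := by omega
  simp only [he]

theorem pv_inv_step (k : Int) (hk : 0 < k) (counts : PySem.Dict (Int × Int) Int)
    (u : List Int) (w : Int)
    (hinv : ∀ (r u' : Int), 0 ≤ r → r < k →
      counts.getD (r, u') 0
        = (((pvStrided (u.drop r.toNat) k.toNat).countP (fun d => d = u')) : Int)) :
    ∀ (r' u' : Int), 0 ≤ r' → r' < k →
      (counts.insert (((u.length % k.toNat : Nat) : Int), w)
          (counts.getD (((u.length % k.toNat : Nat) : Int), w) 0 + 1)).getD (r', u') 0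
        = (((pvStrided ((u ++ [w]).drop r'.toNat) k.toNat).countP (fun d => d = u')) : Int) := by
  have hkN : 0 < k.toNat := by omega
  have hkey0 : (0 : Int) ≤ ((u.length % k.toNat : Nat) : Int) := by omega
  have hkeyk : ((u.length % k.toNat : Nat) : Int) < k := by
    have := Nat.mod_lt u.length hkN
    omega
  intro r' u' h0 h1
  rw [PySem.Dict.getD_insert]
  by_cases hcase : r'.toNat ≤ u.length
  · rw [List.drop_append_of_le_length hcase,
        pvStrided_append k.toNat hkN (u.drop r'.toNat).length (u.drop r'.toNat) w le_rfl]
    have hiff : ((u.drop r'.toNat).length % k.toNat = 0)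
        ↔ (r' = ((u.length % k.toNat : Nat) : Int)) := by
      rw [List.length_drop, pv_mod_sub_iff k.toNat r'.toNat u.length hkN (by omega) hcase]
      constructor <;> intro h <;> omega
    by_cases hr' : r' = ((u.length % k.toNat : Nat) : Int)
    · rw [if_pos (hiff.mpr hr'), List.countP_append, List.countP_singleton]
      have hrt : ((u.length % k.toNat : Nat) : Int).toNat = r'.toNat := by omega
      by_cases hu : u' = w
      · rw [if_pos (by rw [hr', hu]), hinv _ w hkey0 hkeyk, hrt, hu]
        have hb : (decide (w = w)) = true := by simp
        rw [hb]
        simp only [if_pos rfl]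
        push_cast
        ring
      · rw [if_neg (by rw [Prod.mk.injEq]; intro hh; exact hu hh.2), hinv r' u' h0 h1]
        have hb : (decide (w = u')) = false := by
          simp only [decide_eq_false_iff_not]
          intro hh
          exact hu hh.symm
        rw [hb]
        simp
    · rw [if_neg (fun hh => hr' (hiff.mp hh))]
      rw [if_neg (by rw [Prod.mk.injEq]; intro hh; exact hr' hh.1)]
      exact hinv r' u' h0 h1
  · push_neg at hcase
    have hd1 : (u ++ [w]).drop r'.toNat = ([] : List Int) :=
      List.drop_eq_nil_of_le (by simp; omega)
    have hd2 : u.drop r'.toNat = ([] : List Int) := List.drop_eq_nil_of_le (by omega)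
    have hne : ¬ ((r', u') = (((u.length % k.toNat : Nat) : Int), w)) := by
      rw [Prod.mk.injEq]
      intro hh
      have := Nat.mod_le u.length k.toNat
      omega
    rw [if_neg hne, hinv r' u' h0 h1, hd1, hd2]

theorem pv_bloop (pl : List Char) (a0 x y n k : Int) (hk : 0 < k) :
    ∀ (fuel m : Nat) (counts : PySem.Dict (Int × Int) Int) (score : Int),
      (pvV pl a0 x y n).length - m ≤ fuel →
      m ≤ (pvV pl a0 x y n).length →
      score = pvF k.toNat ((pvV pl a0 x y n).take m) →
      (∀ (r u : Int), 0 ≤ r → r < k →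
        counts.getD (r, u) 0
          = (((pvStrided (((pvV pl a0 x y n).take m).drop r.toNat) k.toNat).countP
              (fun d => d = u)) : Int)) →
      ((PySem.List.pyRange (m : Int) (max (pl.length : Int) n) 1).foldl
          (fnosAltStep k pl x y) (counts, score, pvAseq a0 x y m)).2.1
        = pvF k.toNat (pvV pl a0 x y n) := by
  intro fuel
  have hLlen := pv_V_len pl a0 x y n
  have hL0 : (0 : Int) ≤ max (pl.length : Int) n :=
    le_trans (Int.natCast_nonneg _) (le_max_left _ _)
  induction fuel with
  | zero =>
    intro m counts score hfuel hm hscore hinv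
    have hmeq : m = (pvV pl a0 x y n).length := by omega
    rw [PySem.List.pyRange_one_eq_nil (by omega)]
    simp only [List.foldl_nil]
    rw [hscore, hmeq, List.take_length]
  | succ fuel ih =>
    intro m counts score hfuel hm hscore hinv
    by_cases hlt : m < (pvV pl a0 x y n).length
    · have hmL : (m : Int) < max (pl.length : Int) n := by omega
      rw [PySem.List.pyRange_one_cons hmL, List.foldl_cons]
      have hvVm := pv_V_get pl a0 x y n m hlt
      have hVb := pv_V_bounds pl a0 x y n ((pvV pl a0 x y n)[m]) (List.getElem_mem hlt)
      have hkc : k = ((k.toNat : Nat) : Int) := by omega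
      have hrmod : PySem.Int.mod (m : Int) k = ((m % k.toNat : Nat) : Int) := by
        conv_lhs => rw [hkc]
        rw [PySem.Int.mod_natCast]
      have hlentake : ((pvV pl a0 x y n).take m).length = m := by
        rw [List.length_take]
        omega
      have htakes : (pvV pl a0 x y n).take (m + 1)
          = (pvV pl a0 x y n).take m ++ [(pvV pl a0 x y n)[m]] := by
        rw [List.take_add_one, List.getElem?_eq_getElem hlt]
        rfl
      have hstep : fnosAltStep k pl x y (counts, score, pvAseq a0 x y m) (m : Int)
          = (counts.insert (((m % k.toNat : Nat) : Int), (pvV pl a0 x y n)[m])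
               (counts.getD (((m % k.toNat : Nat) : Int), (pvV pl a0 x y n)[m]) 0 + 1),
             pvF k.toNat ((pvV pl a0 x y n).take (m + 1)),
             pvAseq a0 x y (m + 1)) := by
        unfold fnosAltStep
        simp only
        rw [hvVm, hrmod]
        have hcolinv : ∀ u : Int,
            counts.getD (((m % k.toNat : Nat) : Int), u) 0
              = (((pvStrided (((pvV pl a0 x y n).take m).drop (m % k.toNat))
                    k.toNat).countP (fun d => d = u)) : Int) := by
          intro u
          have h0 : (0 : Int) ≤ ((m % k.toNat : Nat) : Int) := by omega
          have h1 : ((m % k.toNat : Nat) : Int) < k := by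
            have := Nat.mod_lt m (show 0 < k.toNat by omega)
            omega
          rw [hinv _ u h0 h1]
          have he : (((m % k.toNat : Nat) : Int)).toNat = m % k.toNat := by omega
          rw [he]
        have hcolb : ∀ d ∈ pvStrided (((pvV pl a0 x y n).take m).drop (m % k.toNat)) k.toNat,
            0 ≤ d := by
          intro d hd
          have hdV : d ∈ pvV pl a0 x y n :=
            List.mem_of_mem_take (List.mem_of_mem_drop (pvStrided_subset _ _ _ hd))
          exact (pv_V_bounds pl a0 x y n d hdV).1
        rw [pv_getD_sum counts _ _ score _ hcolb hVb.1 hcolinv]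
        rw [hscore]
        have hFnext : pvF k.toNat ((pvV pl a0 x y n).take (m + 1))
            = pvF k.toNat ((pvV pl a0 x y n).take m)
              + (((pvStrided (((pvV pl a0 x y n).take m).drop (m % k.toNat)) k.toNat).countP
                  (fun d => d < (pvV pl a0 x y n)[m])) : Int) := by
          rw [htakes, pvF_append k.toNat (by omega) _ _, hlentake]
        rw [hFnext]
        rfl
      rw [hstep]
      have hone : (m : Int) + 1 = (((m + 1 : Nat)) : Int) := by push_cast; ring
      rw [hone]
      apply ih (m + 1) _ _ (by omega) (by omega)
      · rfl
      · intro r u h0 h1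
        rw [htakes]
        have hmain := pv_inv_step k hk counts ((pvV pl a0 x y n).take m) ((pvV pl a0 x y n)[m])
          (fun r0 u0 hr0 hr1 => hinv r0 u0 hr0 hr1) r u h0 h1
        rw [hlentake] at hmain
        exact hmain
    · have hmeq : m = (pvV pl a0 x y n).length := by omega
      rw [PySem.List.pyRange_one_eq_nil (by omega)]
      simp only [List.foldl_nil]
      rw [hscore, hmeq, List.take_length]

theorem pv_B (p : String) (a0 x y n k : Int) (hk : 0 < k) :
    find_number_of_swaps_alt p a0 x y n k = pvF k.toNat (pvV p.toList a0 x y n) := by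
  unfold find_number_of_swaps_alt
  rw [if_neg (by omega)]
  have h := pv_bloop p.toList a0 x y n k hk ((pvV p.toList a0 x y n).length) 0
    PySem.Dict.empty 0 (by omega) (by omega)
    (by rw [List.take_zero, pvF_nil])
    (by
      intro r u h0 h1
      rw [PySem.Dict.getD_empty]
      simp [pvStrided_nil])
  have hz : (((0 : Nat)) : Int) = (0 : Int) := by norm_num
  rw [hz] at h
  exact h

-- ===== VERDICT (by name: the statements are the Claim_ definitions above) =====
theorem find_number_of_swaps_spec : Claim_equal_find_number_of_swaps := by
  unfold Claim_equal_find_number_of_swaps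
  intro p a0 x y n k _ hpre
  unfold Spec_find_number_of_swaps
  by_cases hk : k ≤ 0
  · unfold find_number_of_swaps find_number_of_swaps_alt
    rw [if_pos hk, PySem.List.pyRange_one_eq_nil hk, List.foldl_nil]
  · push_neg at hk
    have hch : ∀ c ∈ p.toList, 71 ≤ c.toNat ∧ c.toNat ≤ 122 := by
      rcases hpre with h | h
      · omega
      · intro c hc
        have hcb := List.all_eq_true.mp h c hc
        simp only [Bool.and_eq_true, decide_eq_true_eq] at hcb
        exact hcb
    rw [pv_A p a0 x y n k hk hch, pv_B p a0 x y n k hk]
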